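-- pv_equiv track=rewrite | github.com/pypi-data/pypi-mirror-138 | packages/move-jismeshcode/move_jismeshcode-0.0.5.tar.gz/move_jismeshcode-0.0.5/move_jismeshcode/sub.py | _extractY
-- ===== SOURCE A (Python) =====
-- from typing import Tuple, Union, List
--
-- def _extractY(ls1: List[int]) -> int:
--     x = ''
--     for i in range(0, len(ls1)):
--       if i >= 8:
--         x += str(ls1[i])
--       elif i in [0,1,4,6]:
--         x += str(ls1[i])
--     return int(x)
-- ===== SOURCE B (Python) =====
-- from typing import List
--
-- def _extractY(ls1: List[int]) -> int:
--     ds = [str(d) for d in ls1]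
--     for i in (7, 5, 3, 2):
--         if i < len(ds):
--             del ds[i]
--     return int(''.join(ds))
-- ===== Notes on version B (the rewrite author's own statement) =====
-- stated objective: alternative
-- what changed: Instead of A's scan over range(len(ls1)) appending entries whose index passes an if/elif test, B stringifies every entry once and deletes the fixed complement indices 7,5,3,2 (descending, each guarded by i < len) from the list, then joins and parses once.
import Mathlib
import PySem

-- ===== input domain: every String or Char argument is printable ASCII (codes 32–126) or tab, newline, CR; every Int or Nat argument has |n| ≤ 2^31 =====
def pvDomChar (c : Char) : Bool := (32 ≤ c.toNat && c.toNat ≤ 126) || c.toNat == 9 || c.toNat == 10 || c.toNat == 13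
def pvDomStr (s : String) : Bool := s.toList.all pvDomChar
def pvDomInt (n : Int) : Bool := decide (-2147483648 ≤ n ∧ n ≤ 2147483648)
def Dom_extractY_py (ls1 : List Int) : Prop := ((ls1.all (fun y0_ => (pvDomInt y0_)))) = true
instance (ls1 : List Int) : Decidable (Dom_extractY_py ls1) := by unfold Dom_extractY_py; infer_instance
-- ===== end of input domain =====

-- B stringifies every entry and deletes the fixed complement indices 7,5,3,2 from the
-- list (descending, each guarded by i < len) instead of A's scan over range(len(ls1))
-- with an if/elif index test; same cost, a plainer construction.

-- ===== PORT A =====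
def extractY_py (ls1 : List Int) : Int :=
  let x : List Char :=
    (PySem.List.pyRange 0 (PySem.List.len ls1) 1).foldl
      (fun x i =>
        if 8 ≤ i then x ++ PySem.Int.toChars (PySem.List.pyGetD ls1 i 0)
        else if i ∈ ([0, 1, 4, 6] : List Int) then x ++ PySem.Int.toChars (PySem.List.pyGetD ls1 i 0)
        else x)
      ([] : List Char)
  (PySem.Int.ofChars? x).getD 0

-- ===== PORT B =====
def extractY_py_alt (ls1 : List Int) : Int :=
  let ds0 : List (List Char) := ls1.map PySem.Int.toChars
  let ds : List (List Char) :=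
    ([7, 5, 3, 2] : List Int).foldl
      (fun ds i => if i < PySem.List.len ds then ds.eraseIdx i.toNat else ds) ds0
  (PySem.Int.ofChars? ds.flatten).getD 0

-- ===== PRECONDITION & SPEC =====
-- Pre_ excludes exactly the inputs on which Python A raises ValueError in int(x):
-- the empty list (int('')) and lists where a selected element other than the first
-- (index 1, 4, 6 or ≥ 8) is negative, which puts a '-' in the middle of the digit string.
def Pre_extractY_py (ls1 : List Int) : Prop :=
  ls1 ≠ [] ∧
  (((ls1.drop 1).take 1 ++ (ls1.drop 4).take 1 ++ (ls1.drop 6).take 1 ++ ls1.drop 8).all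
    (fun x => 0 ≤ x)) = true
instance (ls1 : List Int) : Decidable (Pre_extractY_py ls1) := by unfold Pre_extractY_py; infer_instance
def pvWitness_extractY_py : List Int := [-5, 3, 7, 2, 0, 9, 1, 4, 6, 2]

def Spec_extractY_py (ls1 : List Int) (out : Int) : Prop := out = extractY_py_alt ls1
instance (ls1 : List Int) (out : Int) : Decidable (Spec_extractY_py ls1 out) := by unfold Spec_extractY_py; infer_instance

-- ===== CLAIM (what is proved, stated in full; the proofs are below) =====
def Claim_equal_extractY_py : Prop := ∀ (ls1 : List Int), Dom_extractY_py ls1 → Pre_extractY_py ls1 → Spec_extractY_py ls1 (extractY_py ls1)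

-- ===== LEMMAS AND PROOFS =====

-- A's loop shape: two branches with the same action = append over the filtered list.
lemma foldl_two_if_flatMap {α β : Type} (p q : α → Prop) [DecidablePred p] [DecidablePred q]
    (g : α → List β) (l : List α) (acc : List β) :
    l.foldl (fun acc x => if p x then acc ++ g x else if q x then acc ++ g x else acc) acc
      = acc ++ (l.filter (fun x => decide (p x) || decide (q x))).flatMap g := by
  induction l generalizing acc with
  | nil => simp
  | cons a t ih =>
    by_cases hp : p a <;> by_cases hq : q a <;>
      simp [hp, hq, ih, List.append_assoc]

lemma filter_lit_lt {k : Int} (hk : 6 < k) :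
    (([0, 1, 4, 6] : List Int).filter (fun i => i < k)) = [0, 1, 4, 6] := by
  have h0 : ((0:Int) < k) := by omega
  have h1 : ((1:Int) < k) := by omega
  have h4 : ((4:Int) < k) := by omega
  simp [h0, h1, h4, hk]

-- the selected indices of range(n), in order: 0,1,4,6 (those < n) then 8,…,n-1
lemma sel_range_split (n : Nat) :
    ((PySem.List.pyRange 0 (n : Int) 1).filter
        (fun i => decide (8 ≤ i) || decide (i ∈ ([0, 1, 4, 6] : List Int))))
      = (([0, 1, 4, 6] : List Int).filter (fun i => i < (n : Int)))
        ++ PySem.List.pyRange 8 (n : Int) 1 := by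
  induction n with
  | zero => decide
  | succ m ih =>
    by_cases hm : m < 8
    · interval_cases m <;> decide
    · have h8 : (8 : Int) ≤ (m : Int) := by exact_mod_cast Nat.le_of_not_lt hm
      have hcast : ((m + 1 : Nat) : Int) = (m : Int) + 1 := by push_cast; ring
      rw [hcast, PySem.List.pyRange_one_succ_right (by omega),
          PySem.List.pyRange_one_succ_right h8, List.filter_append, ih]
      simp [filter_lit_lt (show (6:Int) < (m:Int) by omega), h8,
            (show (1:Int) ≤ (m:Int) by omega), (show (4:Int) ≤ (m:Int) by omega),
            (show (6:Int) ≤ (m:Int) by omega)]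

lemma extractY_strings_eq (ls1 : List Int) :
    (PySem.List.pyRange 0 (PySem.List.len ls1) 1).foldl
      (fun x i =>
        if 8 ≤ i then x ++ PySem.Int.toChars (PySem.List.pyGetD ls1 i 0)
        else if i ∈ ([0, 1, 4, 6] : List Int) then x ++ PySem.Int.toChars (PySem.List.pyGetD ls1 i 0)
        else x)
      ([] : List Char)
    = ((([0, 1, 4, 6] : List Int).filter (fun i => i < PySem.List.len ls1)).map
        (fun i => PySem.Int.toChars (PySem.List.pyGetD ls1 i 0))
      ++ (PySem.List.slice ls1 (some 8) none).map PySem.Int.toChars).flatten := by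
  rw [foldl_two_if_flatMap (fun i => (8:Int) ≤ i) (fun i => i ∈ ([0,1,4,6] : List Int))]
  have hlen : PySem.List.len ls1 = ((ls1.length : Nat) : Int) := by
    simp [PySem.List.len]
  rw [hlen, sel_range_split ls1.length, List.nil_append, List.flatMap_append,
      List.flatten_append]
  congr 1
  rw [PySem.List.slice_from ls1 (by norm_num)]
  have hdrop := PySem.List.map_pyGetD_pyRange ls1 0 (a := 8) (by norm_num)
  rw [hlen] at hdrop
  rw [List.flatMap_def, ← hdrop, List.map_map]
  simp [Function.comp_def]

-- B's four guarded deletions produce exactly A's selection (indices 0,1,4,6 then ≥ 8)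
lemma del_eq_sel (ls1 : List Int) :
    ([7, 5, 3, 2] : List Int).foldl
      (fun ds i => if i < PySem.List.len ds then ds.eraseIdx i.toNat else ds)
      (ls1.map PySem.Int.toChars)
    = (([0, 1, 4, 6] : List Int).filter (fun i => i < PySem.List.len ls1)).map
        (fun i => PySem.Int.toChars (PySem.List.pyGetD ls1 i 0))
      ++ (PySem.List.slice ls1 (some 8) none).map PySem.Int.toChars := by
  obtain _ | ⟨a, _ | ⟨b, _ | ⟨c, _ | ⟨d, _ | ⟨e, _ | ⟨f, _ | ⟨g, _ | ⟨h, t⟩⟩⟩⟩⟩⟩⟩⟩ := ls1 <;>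
    simp [PySem.List.len, PySem.List.slice, PySem.List.pyGetD, PySem.List.pyGet?,
      PySem.List.pyIdx?, List.eraseIdx, List.foldl]
  have h0 : ((0:Int) ≤ (t.length:Int)+1+1+1+1+1+1+1) := by omega
  have h1 : ((1:Int) ≤ (t.length:Int)+1+1+1+1+1+1+1) := by omega
  have h4 : ((4:Int) ≤ (t.length:Int)+1+1+1+1+1+1+1) := by omega
  have h6 : ((6:Int) ≤ (t.length:Int)+1+1+1+1+1+1+1) := by omega
  have h7 : ((7:Int) ≤ (t.length:Int)+1+1+1+1+1+1+1) := by omega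
  split_ifs <;> first | omega | simp_all [List.eraseIdx]

-- ===== VERDICT (by name: the statement is the Claim_ definition above) =====
theorem extractY_py_spec : Claim_equal_extractY_py := by
  intro ls1 _ _
  show extractY_py ls1 = extractY_py_alt ls1
  simp only [extractY_py, extractY_py_alt]
  rw [extractY_strings_eq ls1, del_eq_sel ls1]
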